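-- pv_equiv track=rewrite | github.com/vincentLagi/Ergasia | fetch/local_advisor_agent.py | detect_languages
-- ===== SOURCE A (Python) =====
-- def detect_languages(chat_history):
--     """
--     Detect languages used in chat history.
--     Returns list of languages sorted by frequency.
--     """
--     # Simple language detection based on common words
--     language_markers = {
--         "English": ["the", "is", "and", "to", "of", "a", "in", "that", "have", "for"],
--         "Indonesian": ["yang", "dan", "ini", "itu", "dengan", "untuk", "tidak", "akan", "pada", "saya"],
--         "Spanish": ["el", "la", "de", "que", "y", "en", "un", "ser", "se", "no"],
--         "French": ["le", "la", "de", "et", "un", "être", "que", "à", "avoir", "ne"]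
--     }
--
--     # Count language markers in messages
--     language_counts = {lang: 0 for lang in language_markers}
--
--     for msg in chat_history:
--         message = msg.get("message", "").lower()
--         words = message.split()
--
--         for lang, markers in language_markers.items():
--             for word in words:
--                 if word in markers:
--                     language_counts[lang] += 1
--
--     # Sort languages by count
--     sorted_languages = sorted(language_counts.items(), key=lambda x: x[1], reverse=True)
--
--     # Return languages that have at least one marker
--     return [lang for lang, count in sorted_languages if count > 0]
-- ===== SOURCE B (Python) =====
-- # Reverse index: marker word -> the languages using it (some markers are shared),
-- # so the chat text is scanned once per distinct marker instead of per (language, word).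
-- REV_MARKERS = {
--     "the": ["English"], "is": ["English"], "and": ["English"], "to": ["English"],
--     "of": ["English"], "a": ["English"], "in": ["English"], "that": ["English"],
--     "have": ["English"], "for": ["English"],
--     "yang": ["Indonesian"], "dan": ["Indonesian"], "ini": ["Indonesian"],
--     "itu": ["Indonesian"], "dengan": ["Indonesian"], "untuk": ["Indonesian"],
--     "tidak": ["Indonesian"], "akan": ["Indonesian"], "pada": ["Indonesian"],
--     "saya": ["Indonesian"],
--     "el": ["Spanish"], "la": ["Spanish", "French"], "de": ["Spanish", "French"],
--     "que": ["Spanish", "French"], "y": ["Spanish"], "en": ["Spanish"],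
--     "un": ["Spanish", "French"], "ser": ["Spanish"], "se": ["Spanish"], "no": ["Spanish"],
--     "le": ["French"], "et": ["French"], "être": ["French"], "à": ["French"],
--     "avoir": ["French"], "ne": ["French"],
-- }
-- LANGUAGES = ["English", "Indonesian", "Spanish", "French"]
--
--
-- def detect_languages(chat_history):
--     """
--     Detect languages used in chat history.
--     Returns list of languages sorted by frequency.
--     """
--     # Flatten the chat into one word list.
--     words = []
--     for msg in chat_history:
--         words.extend(msg.get("message", "").lower().split())
--
--     # Score via the reverse index: each distinct marker is counted once,
--     # and its count is credited to every language that uses it.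
--     counts = dict.fromkeys(LANGUAGES, 0)
--     for m, langs in REV_MARKERS.items():
--         c = words.count(m)
--         for lang in langs:
--             counts[lang] += c
--
--     # Keep a list ordered by descending count (stable: ties keep LANGUAGES order)
--     # by inserting each language after the existing entries with count >= its own.
--     ordered = []
--     for lang in LANGUAGES:
--         cnt = counts[lang]
--         pos = 0
--         while pos < len(ordered) and ordered[pos][1] >= cnt:
--             pos += 1
--         ordered.insert(pos, (lang, cnt))
--     return [lang for lang, cnt in ordered if cnt > 0]
-- ===== Notes on version B (the rewrite author's own statement) =====
-- stated objective: alternative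
-- what changed: A scans every word of every message against each language's 10-marker list and library-sorts the per-language counts; B flattens the chat once, scores languages through a precomputed reverse index (marker word -> languages, so each distinct marker is counted once and shared markers like 'la'/'de' credit both languages from one count), and builds the descending result by stable manual insertion instead of sorted().
import Mathlib
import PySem

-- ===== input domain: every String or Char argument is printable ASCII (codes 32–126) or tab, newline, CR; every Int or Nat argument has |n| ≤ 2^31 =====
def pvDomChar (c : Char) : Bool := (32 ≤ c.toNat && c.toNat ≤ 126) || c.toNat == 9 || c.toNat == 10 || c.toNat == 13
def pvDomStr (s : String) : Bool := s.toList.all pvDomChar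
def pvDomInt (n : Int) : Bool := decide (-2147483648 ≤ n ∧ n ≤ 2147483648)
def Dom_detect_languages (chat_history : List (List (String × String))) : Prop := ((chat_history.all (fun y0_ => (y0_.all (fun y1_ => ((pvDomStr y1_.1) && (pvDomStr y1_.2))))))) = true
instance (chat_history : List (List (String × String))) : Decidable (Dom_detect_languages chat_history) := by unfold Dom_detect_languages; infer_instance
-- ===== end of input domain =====

set_option maxRecDepth 100000

-- B replaces A's per-word nested membership scans by a reverse marker index (each distinct
-- marker scanned for once) and A's library sort by a hand-maintained descending-ordered list.

-- ===== PORT A =====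
-- the language_markers dict of A, as an items list
def langMarkersA : List (String × List String) :=
  [("English", ["the", "is", "and", "to", "of", "a", "in", "that", "have", "for"]),
   ("Indonesian", ["yang", "dan", "ini", "itu", "dengan", "untuk", "tidak", "akan", "pada", "saya"]),
   ("Spanish", ["el", "la", "de", "que", "y", "en", "un", "ser", "se", "no"]),
   ("French", ["le", "la", "de", "et", "un", "être", "que", "à", "avoir", "ne"])]

def detect_languages (chat_history : List (List (String × String))) : List String :=
  -- language_counts = {lang: 0 for lang in language_markers}
  let counts0 : PySem.Dict String Int := PySem.Dict.ofList (langMarkersA.map (fun p => (p.1, (0 : Int))))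
  -- for msg in chat_history: … for lang, markers in …: for word in words: if word in markers: counts[lang] += 1
  let counts := chat_history.foldl (fun cnts msg =>
    let message := PySem.Str.lower ((PySem.Dict.mk msg).getD "message" "")
    let words := PySem.Str.split₀ message
    langMarkersA.foldl (fun cnts p =>
      words.foldl (fun cnts w =>
        if w ∈ p.2 then cnts.modify p.1 0 (· + 1) else cnts) cnts) cnts) counts0
  -- sorted(language_counts.items(), key=lambda x: x[1], reverse=True)
  let sortedLangs := PySem.List.sorted counts.items (fun x => x.2) true
  -- [lang for lang, count in sorted_languages if count > 0]
  (sortedLangs.filter (fun p => decide (0 < p.2))).map (·.1)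

-- ===== PORT B =====
-- the reverse index REV_MARKERS and LANGUAGES of Source B
def revMarkers : List (String × List String) :=
  [("the", ["English"]), ("is", ["English"]), ("and", ["English"]), ("to", ["English"]),
   ("of", ["English"]), ("a", ["English"]), ("in", ["English"]), ("that", ["English"]),
   ("have", ["English"]), ("for", ["English"]),
   ("yang", ["Indonesian"]), ("dan", ["Indonesian"]), ("ini", ["Indonesian"]),
   ("itu", ["Indonesian"]), ("dengan", ["Indonesian"]), ("untuk", ["Indonesian"]),
   ("tidak", ["Indonesian"]), ("akan", ["Indonesian"]), ("pada", ["Indonesian"]),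
   ("saya", ["Indonesian"]),
   ("el", ["Spanish"]), ("la", ["Spanish", "French"]), ("de", ["Spanish", "French"]),
   ("que", ["Spanish", "French"]), ("y", ["Spanish"]), ("en", ["Spanish"]),
   ("un", ["Spanish", "French"]), ("ser", ["Spanish"]), ("se", ["Spanish"]), ("no", ["Spanish"]),
   ("le", ["French"]), ("et", ["French"]), ("être", ["French"]), ("à", ["French"]),
   ("avoir", ["French"]), ("ne", ["French"])]

def languagesB : List String := ["English", "Indonesian", "Spanish", "French"]

-- Source B's inner while loop + insert: walk past the entries with count >= cnt, insert there
def insertDesc (x : String × Int) : List (String × Int) → List (String × Int)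
  | [] => [x]
  | y :: ys => if x.2 ≤ y.2 then y :: insertDesc x ys else x :: y :: ys

def detect_languages_alt (chat_history : List (List (String × String))) : List String :=
  -- words = []; for msg in chat_history: words.extend(msg.get("message","").lower().split())
  let words : List String := chat_history.foldl (fun ws msg =>
    ws ++ PySem.Str.split₀ (PySem.Str.lower ((PySem.Dict.mk msg).getD "message" ""))) []
  -- counts = dict.fromkeys(LANGUAGES, 0)
  let counts0 : PySem.Dict String Int := PySem.Dict.ofList (languagesB.map (fun l => (l, (0 : Int))))
  -- for m, langs in REV_MARKERS.items(): c = words.count(m); for lang in langs: counts[lang] += c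
  let counts := revMarkers.foldl (fun cnts q =>
    q.2.foldl (fun cnts lang => cnts.insert lang (cnts.getD lang 0 + (words.count q.1 : Int))) cnts) counts0
  -- ordered = []; for lang in LANGUAGES: …insert (lang, counts[lang]) by descending count
  let ordered := languagesB.foldl (fun ord lang => insertDesc (lang, counts.getD lang 0) ord) []
  -- [lang for lang, cnt in ordered if cnt > 0]
  (ordered.filter (fun p => decide (0 < p.2))).map (·.1)

-- ===== PRECONDITION & SPEC =====
def Spec_detect_languages (chat_history : List (List (String × String))) (out : List String) : Prop := out = detect_languages_alt chat_history
instance (chat_history : List (List (String × String))) (out : List String) : Decidable (Spec_detect_languages chat_history out) := by unfold Spec_detect_languages; infer_instance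

-- ===== CLAIM (what is proved, stated in full; the proofs are below) =====
def Claim_equal_detect_languages : Prop := ∀ (chat_history : List (List (String × String))), Dom_detect_languages chat_history → Spec_detect_languages chat_history (detect_languages chat_history)

-- ===== LEMMAS AND PROOFS =====

-- the four marker lists
def mE : List String := ["the", "is", "and", "to", "of", "a", "in", "that", "have", "for"]
def mI : List String := ["yang", "dan", "ini", "itu", "dengan", "untuk", "tidak", "akan", "pada", "saya"]
def mS : List String := ["el", "la", "de", "que", "y", "en", "un", "ser", "se", "no"]
def mF : List String := ["le", "la", "de", "et", "un", "être", "que", "à", "avoir", "ne"]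

-- the words of one message (the expression both ports inline)
def msgWords (msg : List (String × String)) : List String :=
  PySem.Str.split₀ (PySem.Str.lower ((PySem.Dict.mk msg).getD "message" ""))

-- all words of the chat history, in order
def allWords (ch : List (List (String × String))) : List String := ch.flatMap msgWords

-- how often words of ws fall in the marker list ms
def cntIn (ms ws : List String) : Int := (ws.countP (fun w => decide (w ∈ ms)) : Int)

-- the 4-counter dict A threads through its loops
def mkD (a b c d : Int) : PySem.Dict String Int :=
  PySem.Dict.mk [("English", a), ("Indonesian", b), ("Spanish", c), ("French", d)]

-- folding the inlined word expression back to msgWords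
lemma msgWords_def (msg : List (String × String)) :
    PySem.Str.split₀ (PySem.Str.lower ((PySem.Dict.mk msg).getD "message" "")) = msgWords msg := rfl

-- A side, per language: the inner word loop adds cntIn ms ws to that language's slot
lemma foldE (ms : List String) (ws : List String) (a b c d : Int) :
    ws.foldl (fun cnts w => if w ∈ ms then PySem.Dict.modify cnts "English" 0 (· + 1) else cnts) (mkD a b c d)
      = mkD (a + cntIn ms ws) b c d := by
  induction ws generalizing a with
  | nil => simp [cntIn]
  | cons w t ih =>
      by_cases h : w ∈ ms
      · rw [List.foldl_cons, if_pos h,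
          show PySem.Dict.modify (mkD a b c d) "English" 0 (· + 1) = mkD (a + 1) b c d from rfl, ih]
        simp only [mkD, cntIn, List.countP_cons, h, decide_true, if_pos]
        push_cast
        ring_nf
      · rw [List.foldl_cons, if_neg h, ih]
        simp [mkD, cntIn, h]

lemma foldI (ms : List String) (ws : List String) (a b c d : Int) :
    ws.foldl (fun cnts w => if w ∈ ms then PySem.Dict.modify cnts "Indonesian" 0 (· + 1) else cnts) (mkD a b c d)
      = mkD a (b + cntIn ms ws) c d := by
  induction ws generalizing b with
  | nil => simp [cntIn]
  | cons w t ih =>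
      by_cases h : w ∈ ms
      · rw [List.foldl_cons, if_pos h,
          show PySem.Dict.modify (mkD a b c d) "Indonesian" 0 (· + 1) = mkD a (b + 1) c d from rfl, ih]
        simp only [mkD, cntIn, List.countP_cons, h, decide_true, if_pos]
        push_cast
        ring_nf
      · rw [List.foldl_cons, if_neg h, ih]
        simp [mkD, cntIn, h]

lemma foldS (ms : List String) (ws : List String) (a b c d : Int) :
    ws.foldl (fun cnts w => if w ∈ ms then PySem.Dict.modify cnts "Spanish" 0 (· + 1) else cnts) (mkD a b c d)
      = mkD a b (c + cntIn ms ws) d := by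
  induction ws generalizing c with
  | nil => simp [cntIn]
  | cons w t ih =>
      by_cases h : w ∈ ms
      · rw [List.foldl_cons, if_pos h,
          show PySem.Dict.modify (mkD a b c d) "Spanish" 0 (· + 1) = mkD a b (c + 1) d from rfl, ih]
        simp only [mkD, cntIn, List.countP_cons, h, decide_true, if_pos]
        push_cast
        ring_nf
      · rw [List.foldl_cons, if_neg h, ih]
        simp [mkD, cntIn, h]

lemma foldF (ms : List String) (ws : List String) (a b c d : Int) :
    ws.foldl (fun cnts w => if w ∈ ms then PySem.Dict.modify cnts "French" 0 (· + 1) else cnts) (mkD a b c d)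
      = mkD a b c (d + cntIn ms ws) := by
  induction ws generalizing d with
  | nil => simp [cntIn]
  | cons w t ih =>
      by_cases h : w ∈ ms
      · rw [List.foldl_cons, if_pos h,
          show PySem.Dict.modify (mkD a b c d) "French" 0 (· + 1) = mkD a b c (d + 1) from rfl, ih]
        simp only [mkD, cntIn, List.countP_cons, h, decide_true, if_pos]
        push_cast
        ring_nf
      · rw [List.foldl_cons, if_neg h, ih]
        simp [mkD, cntIn, h]

-- A side: the whole counting loop counts, per language, the words lying in its marker list
lemma countsA (ch : List (List (String × String))) (a b c d : Int) :
    ch.foldl (fun cnts msg =>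
        langMarkersA.foldl (fun cnts p =>
          (msgWords msg).foldl (fun cnts w =>
            if w ∈ p.2 then cnts.modify p.1 0 (· + 1) else cnts) cnts) cnts) (mkD a b c d)
      = mkD (a + cntIn mE (allWords ch)) (b + cntIn mI (allWords ch))
            (c + cntIn mS (allWords ch)) (d + cntIn mF (allWords ch)) := by
  induction ch generalizing a b c d with
  | nil => simp [allWords, cntIn]
  | cons msg t ih =>
      rw [List.foldl_cons]
      have hmsg : langMarkersA.foldl (fun cnts p =>
          (msgWords msg).foldl (fun cnts w =>
            if w ∈ p.2 then cnts.modify p.1 0 (· + 1) else cnts) cnts) (mkD a b c d)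
        = mkD (a + cntIn mE (msgWords msg)) (b + cntIn mI (msgWords msg))
              (c + cntIn mS (msgWords msg)) (d + cntIn mF (msgWords msg)) := by
        show List.foldl _ _ _ = _
        simp only [langMarkersA, List.foldl_cons, List.foldl_nil, mE, mI, mS, mF]
        rw [foldE, foldI, foldS, foldF]
      rw [hmsg, ih]
      simp only [mkD, PySem.Dict.mk.injEq, List.cons.injEq, Prod.mk.injEq, allWords,
        List.flatMap_cons, cntIn, List.countP_append, and_true, true_and]
      push_cast
      omega

-- with m outside ms, membership in m :: ms splits the count
lemma countP_mem_cons (m : String) (ms ws : List String) (hm : m ∉ ms) :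
    ws.countP (fun w => decide (w ∈ m :: ms)) = ws.count m + ws.countP (fun w => decide (w ∈ ms)) := by
  induction ws with
  | nil => simp
  | cons w t ih =>
      simp only [List.countP_cons, List.count_cons, ih]
      by_cases h1 : w = m
      · subst h1
        simp [hm]
        omega
      · by_cases h2 : w ∈ ms <;> simp [h1, h2]
        omega

-- summing the counts of the (distinct) markers counts the words lying in the marker list
lemma sum_count_eq_cntIn (ms ws : List String) (h : ms.Nodup) :
    (ms.map (fun m => (ws.count m : Int))).sum = cntIn ms ws := by
  induction ms with
  | nil => simp [cntIn]
  | cons m t ih =>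
      simp only [List.map_cons, List.sum_cons, cntIn] at *
      rw [ih h.of_cons, countP_mem_cons m t ws (List.nodup_cons.mp h).1]
      push_cast
      ring

-- slot lemmas: dict reads/writes at the four language keys, on the 4-counter dict
lemma getE (a b c d : Int) : (mkD a b c d).getD "English" 0 = a := rfl
lemma getI (a b c d : Int) : (mkD a b c d).getD "Indonesian" 0 = b := rfl
lemma getS (a b c d : Int) : (mkD a b c d).getD "Spanish" 0 = c := rfl
lemma getF (a b c d : Int) : (mkD a b c d).getD "French" 0 = d := rfl
lemma insE (a b c d v : Int) : (mkD a b c d).insert "English" v = mkD v b c d := rfl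
lemma insI (a b c d v : Int) : (mkD a b c d).insert "Indonesian" v = mkD a v c d := rfl
lemma insS (a b c d v : Int) : (mkD a b c d).insert "Spanish" v = mkD a b v d := rfl
lemma insF (a b c d v : Int) : (mkD a b c d).insert "French" v = mkD a b c v := rfl

-- B side: the reverse-index pass computes the same four per-language marker counts
lemma countsB (W : List String) :
    revMarkers.foldl (fun cnts q =>
        q.2.foldl (fun cnts lang => cnts.insert lang (cnts.getD lang 0 + (W.count q.1 : Int))) cnts)
      (mkD 0 0 0 0)
    = mkD (cntIn mE W) (cntIn mI W) (cntIn mS W) (cntIn mF W) := by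
  rw [← sum_count_eq_cntIn mE W (by decide), ← sum_count_eq_cntIn mI W (by decide),
      ← sum_count_eq_cntIn mS W (by decide), ← sum_count_eq_cntIn mF W (by decide)]
  simp only [revMarkers, List.foldl_cons, List.foldl_nil, getE, getI, getS, getF,
    insE, insI, insS, insF]
  simp only [mE, mI, mS, mF, List.map_cons, List.map_nil, List.sum_cons, List.sum_nil,
    mkD, PySem.Dict.mk.injEq, List.cons.injEq, Prod.mk.injEq, and_true, true_and]
  refine ⟨by ring, by ring, by ring, by ring⟩

-- the items list of the 4-counter dict, written out
lemma items_mkD (a b c d : Int) :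
    (mkD a b c d).items = [("English", a), ("Indonesian", b), ("Spanish", c), ("French", d)] := rfl

-- Source B's manual descending insertion is PySem's insertBy with the reverse-sort comparison
lemma insertDesc_eq (x : String × Int) (ys : List (String × Int)) :
    insertDesc x ys = PySem.List.insertBy (fun a b => decide (b.2 < a.2)) x ys := by
  induction ys with
  | nil => simp [insertDesc, PySem.List.insertBy]
  | cons y t ih =>
      simp only [insertDesc, PySem.List.insertBy]
      by_cases h : x.2 ≤ y.2
      · rw [if_pos h, ih]
        simp [not_lt.mpr h]
      · rw [if_neg h]
        simp [lt_of_not_ge h]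

-- ===== VERDICT (by name: the statement is the Claim_ definition above) =====
theorem detect_languages_spec : Claim_equal_detect_languages := by
  intro ch _hdom
  show detect_languages ch = detect_languages_alt ch
  simp only [detect_languages, detect_languages_alt]
  simp only [msgWords_def]
  rw [show PySem.Dict.ofList (langMarkersA.map (fun p => (p.1, (0 : Int)))) = mkD 0 0 0 0 from rfl]
  rw [show PySem.Dict.ofList (languagesB.map (fun l => (l, (0 : Int)))) = mkD 0 0 0 0 from rfl]
  rw [countsA]
  have hW : (List.foldl (fun ws msg => ws ++ msgWords msg) [] ch) = allWords ch := by
    rw [PySem.List.foldl_append_eq_flatMap]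
    simp [allWords]
  rw [hW, countsB (allWords ch)]
  simp only [zero_add]
  rw [PySem.List.sorted_rev_eq_foldl_insertBy, items_mkD]
  simp only [languagesB, List.foldl_cons, List.foldl_nil, getE, getI, getS, getF, insertDesc_eq]
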